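-- pv_equiv track=rewrite | github.com/yknishimuta/nlpo_toolkit | nlpo_toolkit/nlp.py | iter_char_chunks
-- ===== SOURCE A (Python) =====
-- from typing import Set, Optional, Counter as CounterType, Dict, List, Iterable, Mapping, Union, Callable, Any
--
-- def iter_char_chunks(text: str, chunk_chars: int) -> Iterable[str]:
--     """Splits the text based on a target character count (adjusted at whitespaces to avoid splitting words)"""
--     start = 0
--     text_len = len(text)
--     while start < text_len:
--         end = start + chunk_chars
--         if end >= text_len:
--             yield text[start:]
--             break
--
--         # Backtrack slightly to a whitespace to avoid splitting a word
--         while end > start and not text[end].isspace():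
--             end -= 1
--         if end == start:  # Fallback in case of a single massive word
--             end = start + chunk_chars
--
--         yield text[start:end]
--         start = end
-- ===== SOURCE B (Python) =====
-- def iter_char_chunks(text: str, chunk_chars: int):
--     """Splits the text based on a target character count (adjusted at whitespaces to avoid splitting words)"""
--     n = len(text)
--     # One pass: prev_space[i] = index of the last whitespace at or before i, or -1.
--     prev_space = []
--     last = -1
--     for i, c in enumerate(text):
--         if c.isspace():
--             last = i
--         prev_space.append(last)
--     start = 0
--     while start < n:
--         end = start + chunk_chars
--         if end >= n:
--             yield text[start:]
--             return
--         p = prev_space[end]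
--         end = p if p > start else start + chunk_chars
--         yield text[start:end]
--         start = end
-- ===== Notes on version B (the rewrite author's own statement) =====
-- stated objective: alternative
-- what changed: Replaces the per-chunk backward backtracking scan with a single precomputed last-whitespace-at-or-before index array, so each chunk's split point is an O(1) lookup instead of an inner while loop.
import Mathlib
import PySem

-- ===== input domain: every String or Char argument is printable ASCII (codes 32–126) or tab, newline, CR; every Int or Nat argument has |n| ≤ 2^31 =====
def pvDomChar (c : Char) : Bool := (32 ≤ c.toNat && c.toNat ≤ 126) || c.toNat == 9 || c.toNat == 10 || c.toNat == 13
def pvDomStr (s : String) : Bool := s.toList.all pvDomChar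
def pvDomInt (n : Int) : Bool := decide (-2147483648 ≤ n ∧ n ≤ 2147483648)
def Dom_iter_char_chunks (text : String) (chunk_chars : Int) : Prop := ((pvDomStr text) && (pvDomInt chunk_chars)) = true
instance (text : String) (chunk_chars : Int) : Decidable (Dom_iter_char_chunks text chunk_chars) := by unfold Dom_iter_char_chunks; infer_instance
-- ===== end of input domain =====

-- B replaces A's per-chunk backward whitespace backtracking with a precomputed
-- last-whitespace-at-or-before index list, making each chunk's split point one lookup
-- (objective: alternative). Return value is a list of the generator's yields.

-- ===== PORT A =====
-- text[end].isspace(): the index is always in range when Pre_ holds; the `.getD ' '` default is unreachable there.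
def pvSpAt (t : List Char) (e : Int) : Bool :=
  PySem.Chars.isspace ((PySem.List.pyGet? t e).getD ' ')

-- inner `while end > start and not text[end].isspace(): end -= 1`
def pvABack (t : List Char) (start : Int) (e : Int) : Int :=
  if e > start ∧ ¬ pvSpAt t e = true then pvABack t start (e - 1) else e
termination_by (e - start).toNat
decreasing_by omega

-- outer `while start < text_len` loop; fuel bounds the number of chunks (each chunk
-- advances start by ≥ 1 when chunk_chars ≥ 1, so text.length + 1 suffices).
def pvALoop (t : List Char) (cc : Int) : Int → Nat → List String
  | _, 0 => []
  | start, fuel + 1 =>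
    if start < (t.length : Int) then
      let e0 := start + cc
      if e0 ≥ (t.length : Int) then
        [String.ofList (PySem.List.slice t (some start) none)]
      else
        let e1 := pvABack t start e0
        let e := if e1 = start then start + cc else e1
        String.ofList (PySem.List.slice t (some start) (some e)) :: pvALoop t cc e fuel
    else []

def iter_char_chunks (text : String) (chunk_chars : Int) : List String :=
  pvALoop text.toList chunk_chars 0 (text.toList.length + 1)

-- ===== PORT B =====
-- `for i, c in enumerate(text): … prev_space.append(last)`
def pvBPrevLoop (pairs : List (Int × Char)) (prev : List Int) (last : Int) : List Int :=
  match pairs with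
  | [] => prev
  | (i, c) :: rest =>
    let l := if PySem.Chars.isspace c = true then i else last
    pvBPrevLoop rest (prev ++ [l]) l

def pvBPrev (t : List Char) : List Int :=
  pvBPrevLoop (PySem.List.enumerate t 0) [] (-1)

-- outer `while start < n` loop of B, same fuel bound as A's port.
-- prev_space[end]: in range whenever Pre_ holds; the `.getD (-1)` default is unreachable there.
def pvBLoop (t : List Char) (ps : List Int) (cc : Int) : Int → Nat → List String
  | _, 0 => []
  | start, fuel + 1 =>
    if start < (t.length : Int) then
      let e0 := start + cc
      if e0 ≥ (t.length : Int) then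
        [String.ofList (PySem.List.slice t (some start) none)]
      else
        let p := (PySem.List.pyGet? ps e0).getD (-1)
        let e := if p > start then p else start + cc
        String.ofList (PySem.List.slice t (some start) (some e)) :: pvBLoop t ps cc e fuel
    else []

def iter_char_chunks_alt (text : String) (chunk_chars : Int) : List String :=
  pvBLoop text.toList (pvBPrev text.toList) chunk_chars 0 (text.toList.length + 1)

-- ===== PRECONDITION & SPEC =====
-- Pre_ excludes non-empty text with chunk_chars ≤ 0, on which A (a generator) never
-- terminates and thus returns no value; on empty text A returns [] for any chunk_chars.
def Pre_iter_char_chunks (text : String) (chunk_chars : Int) : Prop :=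
  text = "" ∨ 1 ≤ chunk_chars
instance (text : String) (chunk_chars : Int) : Decidable (Pre_iter_char_chunks text chunk_chars) := by
  unfold Pre_iter_char_chunks; infer_instance

def pvWitness_iter_char_chunks : String × Int := ("ab cd", 3)

def Spec_iter_char_chunks (text : String) (chunk_chars : Int) (out : List String) : Prop := out = iter_char_chunks_alt text chunk_chars
instance (text : String) (chunk_chars : Int) (out : List String) : Decidable (Spec_iter_char_chunks text chunk_chars out) := by unfold Spec_iter_char_chunks; infer_instance

-- ===== CLAIM (what is proved, stated in full; the proofs are below) =====
def Claim_equal_iter_char_chunks : Prop := ∀ (text : String) (chunk_chars : Int), Dom_iter_char_chunks text chunk_chars → Pre_iter_char_chunks text chunk_chars → Spec_iter_char_chunks text chunk_chars (iter_char_chunks text chunk_chars)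

-- ===== LEMMAS AND PROOFS =====

-- proof-side rendering of B's prev_space construction, as a structural recursion
def pvPrevAux (i last : Int) : List Char → List Int
  | [] => []
  | c :: cs =>
    let l := if PySem.Chars.isspace c = true then i else last
    l :: pvPrevAux (i + 1) l cs

theorem pvBPrevLoop_eq (cs : List Char) : ∀ (i : Int) (prev : List Int) (last : Int),
    pvBPrevLoop (PySem.List.enumerate cs i) prev last = prev ++ pvPrevAux i last cs := by
  induction cs with
  | nil => intro i prev last; simp [PySem.List.enumerate_nil, pvBPrevLoop, pvPrevAux]
  | cons c cs ih =>
    intro i prev last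
    rw [PySem.List.enumerate_cons]
    simp only [pvBPrevLoop, pvPrevAux]
    rw [ih]
    simp

theorem pvBPrev_eq (t : List Char) : pvBPrev t = pvPrevAux 0 (-1) t := by
  simpa using pvBPrevLoop_eq t 0 [] (-1)

theorem pvPrevAux_length (cs : List Char) : ∀ (i last : Int), (pvPrevAux i last cs).length = cs.length := by
  induction cs with
  | nil => intro i last; rfl
  | cons c cs ih => intro i last; simp [pvPrevAux, ih]

theorem pvPrevAux_get_zero (c : Char) (cs : List Char) (i last : Int) :
    (pvPrevAux i last (c :: cs))[0]? = some (if PySem.Chars.isspace c = true then i else last) := by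
  simp [pvPrevAux]

theorem pvPrevAux_get_succ (k : Nat) : ∀ (cs : List Char) (i last : Int) (h : k + 1 < cs.length),
    (pvPrevAux i last cs)[k + 1]? =
      some (if PySem.Chars.isspace cs[k + 1] = true then i + (k + 1 : Nat)
            else ((pvPrevAux i last cs)[k]?).getD 0) := by
  induction k with
  | zero =>
    intro cs i last h
    match cs with
    | c0 :: c1 :: rest =>
      by_cases hsp : PySem.Chars.isspace c1 = true <;> simp [pvPrevAux, hsp]
  | succ k ih =>
    intro cs i last h
    match cs with
    | c0 :: cs' =>
      simp only [pvPrevAux]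
      have h' : k + 1 < cs'.length := by simpa using h
      rw [List.getElem?_cons_succ, List.getElem?_cons_succ, ih cs' (i + 1) _ h']
      have : (i + 1) + ((k + 1 : Nat) : Int) = i + ((k + 1 + 1 : Nat) : Int) := by push_cast; ring
      simp only [this]
      congr 1

-- bound: every entry of B's prev_space list at index k is ≤ k (entries are -1 or a seen index)
theorem pvPrevAux_get_le (t : List Char) : ∀ (k : Nat) (_h : k < t.length),
    ((pvPrevAux 0 (-1) t)[k]?).getD 0 ≤ (k : Int) := by
  intro k
  induction k with
  | zero =>
    intro h
    match t, h with
    | c :: cs, _ => rw [pvPrevAux_get_zero]; split <;> simp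
  | succ k ih =>
    intro h
    rw [pvPrevAux_get_succ k t 0 (-1) h]
    split
    · simp
    · have := ih (by omega)
      simp only [Option.getD_some]
      omega

-- pvSpAt at an in-range natural index is isspace of that character
theorem pvSpAt_natCast (t : List Char) (n : Nat) (h : n < t.length) :
    pvSpAt t (n : Int) = PySem.Chars.isspace t[n] := by
  simp [pvSpAt, PySem.List.pyGet?_natCast, List.getElem?_eq_getElem h]

-- key lemma: A's backward scan result expressed through B's precomputed table
theorem pvABack_eq (t : List Char) : ∀ (n : Nat) (hn : n < t.length) (start : Int),
    0 ≤ start → start < (n : Int) →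
    pvABack t start (n : Int) =
      (if ((pvPrevAux 0 (-1) t)[n]?).getD 0 > start then ((pvPrevAux 0 (-1) t)[n]?).getD 0 else start) := by
  intro n
  induction n with
  | zero => intro _hn start h0 hlt; omega
  | succ n ih =>
    intro hn start h0 hlt
    rw [pvABack]
    rw [pvSpAt_natCast t (n + 1) hn]
    rw [pvPrevAux_get_succ n t 0 (-1) hn]
    simp only [Option.getD_some]
    by_cases hsp : PySem.Chars.isspace t[n + 1] = true
    · simp only [hsp, if_true]
      rw [if_neg (by simp), if_pos (by push_cast at hlt ⊢; omega)]
      omega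
    · have hsp' : PySem.Chars.isspace t[n + 1] = false := by simpa using hsp
      rw [if_pos ⟨hlt, hsp⟩]
      simp only [hsp', Bool.false_eq_true, if_false]
      rw [show ((n + 1 : Nat) : Int) - 1 = (n : Int) by push_cast; ring]
      by_cases hse : start < (n : Int)
      · rw [ih (by omega) start h0 hse]
      · have hstart : start = (n : Int) := by push_cast at hlt; omega
        rw [pvABack, if_neg (by omega)]
        have hle := pvPrevAux_get_le t n (by omega)
        rw [if_neg (by omega)]
        omega

-- the two chunk loops agree step by step
theorem pvLoop_eq (t : List Char) (cc : Int) (hcc : 1 ≤ cc) : ∀ (fuel : Nat) (start : Int),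
    0 ≤ start → pvALoop t cc start fuel = pvBLoop t (pvBPrev t) cc start fuel := by
  intro fuel
  induction fuel with
  | zero => intro start h0; rfl
  | succ fuel ih =>
    intro start h0
    simp only [pvALoop, pvBLoop]
    by_cases h1 : start < (t.length : Int)
    · rw [if_pos h1, if_pos h1]
      by_cases h2 : start + cc ≥ (t.length : Int)
      · rw [if_pos h2, if_pos h2]
      · rw [if_neg h2, if_neg h2]
        -- the split index start + cc is a natural number < t.length
        have he0 : ∃ n : Nat, (n : Int) = start + cc ∧ n < t.length := by
          refine ⟨(start + cc).toNat, by omega, by omega⟩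
        obtain ⟨n, hn, hnlt⟩ := he0
        have hback := pvABack_eq t n hnlt start h0 (by omega)
        rw [hn] at hback
        have hps : (PySem.List.pyGet? (pvBPrev t) (start + cc)).getD (-1) =
            ((pvPrevAux 0 (-1) t)[n]?).getD 0 := by
          rw [pvBPrev_eq, ← hn, PySem.List.pyGet?_natCast]
          have : n < (pvPrevAux 0 (-1) t).length := by rw [pvPrevAux_length]; exact hnlt
          rw [List.getElem?_eq_getElem this]
          simp
        set p := ((pvPrevAux 0 (-1) t)[n]?).getD 0 with hp
        rw [hps, hback]
        by_cases hgt : p > start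
        · rw [if_pos hgt, if_pos hgt, if_neg (by omega)]
          exact congrArg _ (ih p (by omega))
        · rw [if_neg hgt, if_neg hgt, if_pos rfl]
          exact congrArg _ (ih (start + cc) (by omega))
    · rw [if_neg h1, if_neg h1]

-- ===== VERDICT (by name: the statement is the Claim_ definition above) =====
theorem iter_char_chunks_spec : Claim_equal_iter_char_chunks := by
  intro text cc _ hpre
  unfold Spec_iter_char_chunks iter_char_chunks iter_char_chunks_alt
  rcases hpre with hempty | hcc
  · subst hempty
    rfl
  · exact pvLoop_eq text.toList cc hcc _ 0 le_rfl
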